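-- pv_equiv track=rewrite | github.com/Revilo199/Thesis-Code | thesiscodev_last_update_2022.py | dycke_paths
-- ===== SOURCE A (Python) =====
-- from typing import Iterator, List, Tuple, Any
--
-- Point = Tuple[int, int]
--
-- def dycke_paths(p1: Point, p2: Point) -> Iterator[List[Point]]:
--     """Generate path from some upper left point to some down right point (credit to Alex for this)"""
--     if p1 == p2:
--         yield [p2]
--         return
--     if p1[0] < p2[0]:
--         for path in dycke_paths((p1[0] + 1, p1[1]), p2):
--             yield [p1] + path
--     if p1[1] > p2[1]:
--         for path in dycke_paths((p1[0], p1[1] - 1), p2):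
--             yield [p1] + path
-- ===== SOURCE B (Python) =====
-- from typing import Iterator, List, Tuple, Any
--
-- Point = Tuple[int, int]
--
-- def dycke_paths(p1: Point, p2: Point) -> Iterator[List[Point]]:
--     """Same enumeration, but DFS over a single shared prefix list (append/pop),
--     copying a path only at the moment it is yielded, instead of rebuilding
--     [p1] + path at every recursion level."""
--     x2, y2 = p2
--     prefix: List[Point] = []
--
--     def go(x: int, y: int) -> Iterator[List[Point]]:
--         if x == x2 and y == y2:
--             yield prefix + [(x, y)]
--             return
--         prefix.append((x, y))
--         if x < x2:
--             yield from go(x + 1, y)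
--         if y > y2:
--             yield from go(x, y - 1)
--         prefix.pop()
--
--     yield from go(p1[0], p1[1])
-- ===== Notes on version B (the rewrite author's own statement) =====
-- stated objective: alternative
-- what changed: B walks the move tree with one shared prefix list (append/pop) and copies a path only when it is yielded, instead of A's rebuilding [p1] + path at every recursion level of every path.
import Mathlib
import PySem

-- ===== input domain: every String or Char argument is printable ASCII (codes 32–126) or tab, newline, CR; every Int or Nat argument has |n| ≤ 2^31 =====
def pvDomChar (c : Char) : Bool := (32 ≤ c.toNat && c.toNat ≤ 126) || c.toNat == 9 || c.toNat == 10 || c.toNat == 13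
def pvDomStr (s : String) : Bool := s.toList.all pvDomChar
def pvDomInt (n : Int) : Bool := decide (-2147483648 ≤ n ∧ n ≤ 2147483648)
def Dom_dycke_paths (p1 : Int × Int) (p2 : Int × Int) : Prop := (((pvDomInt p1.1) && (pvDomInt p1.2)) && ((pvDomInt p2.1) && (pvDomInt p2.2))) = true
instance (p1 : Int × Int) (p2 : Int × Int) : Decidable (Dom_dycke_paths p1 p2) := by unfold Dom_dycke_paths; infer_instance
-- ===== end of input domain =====

-- B changes: one shared prefix accumulator with copy-at-yield replaces A's per-level list concatenation.
-- ===== PORT A =====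
def dycke_paths (p1 : Int × Int) (p2 : Int × Int) : List (List (Int × Int)) :=
  if p1 = p2 then [[p2]]
  else
    (if p1.1 < p2.1 then (dycke_paths (p1.1 + 1, p1.2) p2).map (fun path => p1 :: path) else [])
    ++
    (if p1.2 > p2.2 then (dycke_paths (p1.1, p1.2 - 1) p2).map (fun path => p1 :: path) else [])
termination_by ((p2.1 - p1.1).toNat + (p1.2 - p2.2).toNat)
decreasing_by all_goals simp_all

-- ===== PORT B =====
-- Python B's inner 'go': the mutated shared prefix is the pfx argument (append = pass pfx ++ [(x,y)]
-- to the children, pop = return to the caller's pfx), yields accumulate in out.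
def dyckeGo (p2 : Int × Int) (x y : Int) (pfx : List (Int × Int)) (out : List (List (Int × Int))) : List (List (Int × Int)) :=
  if x = p2.1 ∧ y = p2.2 then out ++ [pfx ++ [(x, y)]]
  else
    let pfx' := pfx ++ [(x, y)]
    let out1 := if x < p2.1 then dyckeGo p2 (x + 1) y pfx' out else out
    if y > p2.2 then dyckeGo p2 x (y - 1) pfx' out1 else out1
termination_by ((p2.1 - x).toNat + (y - p2.2).toNat)
decreasing_by all_goals simp_all

def dycke_paths_alt (p1 : Int × Int) (p2 : Int × Int) : List (List (Int × Int)) :=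
  dyckeGo p2 p1.1 p1.2 [] []

-- ===== PRECONDITION & SPEC =====
-- Pre_ excludes exactly the inputs on which the Python A raises RecursionError: the generator nesting
-- depth equals the number of lattice steps max(p2.1-p1.1,0)+max(p1.2-p2.2,0), and under the grader
-- runner's recursion limit (10000) Python A returns for every depth <= 9996 and raises from 9997 on.
def Pre_dycke_paths (p1 : Int × Int) (p2 : Int × Int) : Prop :=
  max (p2.1 - p1.1) 0 + max (p1.2 - p2.2) 0 ≤ 9996
instance (p1 : Int × Int) (p2 : Int × Int) : Decidable (Pre_dycke_paths p1 p2) := by unfold Pre_dycke_paths; infer_instance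
def pvWitness_dycke_paths : (Int × Int) × (Int × Int) := ((0, 2), (2, 0))

def Spec_dycke_paths (p1 : Int × Int) (p2 : Int × Int) (out : List (List (Int × Int))) : Prop := out = dycke_paths_alt p1 p2
instance (p1 : Int × Int) (p2 : Int × Int) (out : List (List (Int × Int))) : Decidable (Spec_dycke_paths p1 p2 out) := by unfold Spec_dycke_paths; infer_instance

-- ===== CLAIM (what is proved, stated in full; the proofs are below) =====
def Claim_equal_dycke_paths : Prop := ∀ (p1 : Int × Int) (p2 : Int × Int), Dom_dycke_paths p1 p2 → Pre_dycke_paths p1 p2 → Spec_dycke_paths p1 p2 (dycke_paths p1 p2)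

-- ===== LEMMAS AND PROOFS =====

lemma dyckeGo_eq (p2 : Int × Int) (x y : Int) (pfx : List (Int × Int)) (out : List (List (Int × Int))) :
    dyckeGo p2 x y pfx out = out ++ (dycke_paths (x, y) p2).map (fun path => pfx ++ path) := by
  fun_induction dyckeGo p2 x y pfx out
  case case1 x y pfx out h =>
    rw [dycke_paths]
    simp [h.1, h.2]
  case case2 =>
    rename_i x y pfx out hne pfx' out1 hy ih3 ih2 ih1
    have hpfx : pfx' = pfx ++ [(x, y)] := rfl
    have hout : out1 = (if _ : x < p2.1 then dyckeGo p2 (x + 1) y pfx' out else out) := rfl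
    rw [dycke_paths, ih1, hout, hpfx]
    have hp : ((x, y) : Int × Int) ≠ p2 := by simpa [Prod.ext_iff] using hne
    rw [if_neg hp]
    by_cases hx : x < p2.1
    · rw [dif_pos hx, ih2 hx]
      simp [hx, hy, List.map_map, Function.comp_def]
    · rw [dif_neg hx]
      simp [hx, hy, List.map_map, Function.comp_def]
  case case3 =>
    rename_i x y pfx out hne pfx' out1 hy ih1
    have hpfx : pfx' = pfx ++ [(x, y)] := rfl
    have hout : out1 = (if _ : x < p2.1 then dyckeGo p2 (x + 1) y pfx' out else out) := rfl
    rw [dycke_paths, hout, hpfx]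
    have hp : ((x, y) : Int × Int) ≠ p2 := by simpa [Prod.ext_iff] using hne
    rw [if_neg hp]
    by_cases hx : x < p2.1
    · rw [hpfx] at ih1
      rw [dif_pos hx, ih1 hx]
      simp [hx, hy, List.map_map, Function.comp_def]
    · rw [dif_neg hx]
      simp [hx, hy]

-- ===== VERDICT (by name: the statement is the Claim_ definition above) =====
theorem dycke_paths_spec : Claim_equal_dycke_paths := by
  intro p1 p2 _ _
  unfold Spec_dycke_paths dycke_paths_alt
  rw [dyckeGo_eq]
  simp
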